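-- pv_equiv track=rewrite | github.com/Autixx/ONyX-MASQUE | onx/services/dns_policy_service.py | _normalize_ports
-- ===== SOURCE A (Python) =====
-- from typing import Iterable
--
-- def _normalize_ports(values: Iterable[int]) -> list[int]:
--     normalized: list[int] = []
--     seen: set[int] = set()
--     for raw in values:
--         try:
--             port = int(raw)
--         except (TypeError, ValueError) as exc:
--             raise ValueError("capture_ports must contain only integer values.") from exc
--         if port < 1 or port > 65535:
--             raise ValueError("capture_ports values must be in range 1..65535.")
--         if port in seen:
--             continue
--         seen.add(port)
--         normalized.append(port)
--     if not normalized: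
--         raise ValueError("capture_ports must not be empty.")
--     return normalized
-- ===== SOURCE B (Python) =====
-- def _normalize_ports(values):
--     ports = []
--     for raw in values:
--         try:
--             port = int(raw)
--         except (TypeError, ValueError) as exc:
--             raise ValueError("capture_ports must contain only integer values.") from exc
--         if port < 1 or port > 65535:
--             raise ValueError("capture_ports values must be in range 1..65535.")
--         ports.append(port)
--     if not ports:
--         raise ValueError("capture_ports must not be empty.")
--     return [p for i, p in enumerate(ports) if p not in ports[:i]]
-- ===== Notes on version B (the rewrite author's own statement) =====
-- stated objective: alternative
-- what changed: A dedups on the fly with an auxiliary seen-set while appending; B first builds the validated list, then selects first occurrences by a brute-force membership scan over each element's own prefix (p not in ports[:i]), keeping no auxiliary set or accumulator at all.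
import Mathlib
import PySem

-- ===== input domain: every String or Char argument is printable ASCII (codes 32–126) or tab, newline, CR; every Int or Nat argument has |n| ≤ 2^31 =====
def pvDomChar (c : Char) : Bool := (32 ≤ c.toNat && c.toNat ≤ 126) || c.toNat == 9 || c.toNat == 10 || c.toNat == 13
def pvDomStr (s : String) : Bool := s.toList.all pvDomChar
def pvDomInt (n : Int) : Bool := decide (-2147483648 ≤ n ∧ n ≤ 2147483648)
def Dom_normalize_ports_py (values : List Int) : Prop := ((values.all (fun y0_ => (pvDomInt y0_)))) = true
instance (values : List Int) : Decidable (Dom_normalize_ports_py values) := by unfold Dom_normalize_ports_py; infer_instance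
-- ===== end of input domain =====

-- B replaces A's on-the-fly dedup (seen-set + manual appends inside the validation loop) by a
-- validated list followed by a brute-force first-occurrence selection: keep ports[i] iff it does
-- not occur in ports[:i] (no auxiliary set, no accumulator). Alternative algorithm, return values equal.
-- A's raises (out-of-range port, empty input) are excluded by Pre_; on admitted inputs no exception fires.

-- ===== PORT A =====
-- A's loop over `values` with state (normalized, seen); int(raw) on an Int is raw,
-- and the range-check raise cannot fire inside Pre_, so the loop body is the seen-test.
def normalize_ports_py_go : List Int → List Int → PySem.Set Int → List Int
  | [], normalized, _ => normalized
  | raw :: rest, normalized, seen =>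
      if PySem.Set.contains seen raw then
        normalize_ports_py_go rest normalized seen
      else
        normalize_ports_py_go rest (normalized ++ [raw]) (PySem.Set.add seen raw)

def normalize_ports_py (values : List Int) : List Int :=
  normalize_ports_py_go values [] PySem.Set.empty

-- ===== PORT B =====
-- B: ports = [validated ints] (identity on Ints inside Pre_: int(raw) = raw, the range raise
-- cannot fire), then [p for i, p in enumerate(ports) if p not in ports[:i]].
def normalize_ports_py_alt (values : List Int) : List Int :=
  let ports := values.map (fun raw => raw)
  ((PySem.List.enumerate ports 0).filter
      (fun ip => !((PySem.List.slice ports none (some ip.1)).contains ip.2))).map (·.2)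

-- ===== PRECONDITION & SPEC =====
-- Pre_ excludes exactly the inputs where Python A raises ValueError: an empty list
-- ("must not be empty.") or any element outside 1..65535 ("range 1..65535.").
def Pre_normalize_ports_py (values : List Int) : Prop :=
  values ≠ [] ∧ ∀ v ∈ values, 1 ≤ v ∧ v ≤ 65535
instance (values : List Int) : Decidable (Pre_normalize_ports_py values) := by
  unfold Pre_normalize_ports_py; infer_instance

def pvWitness_normalize_ports_py : List Int := [80, 443, 80, 22]

def Spec_normalize_ports_py (values : List Int) (out : List Int) : Prop := out = normalize_ports_py_alt values
instance (values : List Int) (out : List Int) : Decidable (Spec_normalize_ports_py values out) := by unfold Spec_normalize_ports_py; infer_instance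

-- ===== CLAIM (what is proved, stated in full; the proofs are below) =====
def Claim_equal_normalize_ports_py : Prop := ∀ (values : List Int), Dom_normalize_ports_py values → Pre_normalize_ports_py values → Spec_normalize_ports_py values (normalize_ports_py values)

-- ===== LEMMAS AND PROOFS =====

-- Common characterisation: first occurrences of `l`, given the already-seen elements `seen`.
def firstOcc : List Int → List Int → List Int
  | _, [] => []
  | seen, x :: xs => if x ∈ seen then firstOcc seen xs else x :: firstOcc (seen ++ [x]) xs

theorem firstOcc_congr (s t l : List Int) (h : ∀ x, x ∈ s ↔ x ∈ t) :
    firstOcc s l = firstOcc t l := by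
  induction l generalizing s t with
  | nil => rfl
  | cons x xs ih =>
      simp only [firstOcc]
      by_cases hx : x ∈ s
      · rw [if_pos hx, if_pos ((h x).mp hx), ih s t h]
      · rw [if_neg hx, if_neg (fun hc => hx ((h x).mpr hc)),
            ih (s ++ [x]) (t ++ [x]) (by intro y; simp [h y])]

-- A's loop equals `seen ++ firstOcc seen` when normalized = seen (membership-wise: here literally).
theorem go_eq_firstOcc (l s : List Int) :
    normalize_ports_py_go l s s = s ++ firstOcc s l := by
  induction l generalizing s with
  | nil => simp [normalize_ports_py_go, firstOcc]
  | cons x xs ih =>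
      simp only [normalize_ports_py_go, firstOcc]
      by_cases hx : x ∈ s
      · have hc : PySem.Set.contains s x = true := by
          simp [PySem.Set.contains]; exact hx
        rw [if_pos hc, if_pos hx, ih s]
      · have hc : PySem.Set.contains s x = false := by
          simp [PySem.Set.contains]; exact hx
        have hadd : PySem.Set.add s x = s ++ [x] := by
          simp [PySem.Set.add, PySem.Set.contains, hx]
        rw [hc, hadd]
        simp only [Bool.false_eq_true, if_false, if_neg hx]
        rw [ih (s ++ [x])]
        simp

-- B's prefix-scan filter equals firstOcc, generalized over the processed prefix.
theorem filter_eq_firstOcc (l : List Int) :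
    ∀ (xs pre : List Int), l = pre ++ xs →
      ((PySem.List.enumerate xs (pre.length)).filter
          (fun ip => !((PySem.List.slice l none (some ip.1)).contains ip.2))).map (·.2)
        = firstOcc pre xs := by
  intro xs
  induction xs with
  | nil => intro pre _; simp [PySem.List.enumerate, firstOcc]
  | cons x xs ih =>
      intro pre hl
      rw [PySem.List.enumerate_cons]
      have hslice : PySem.List.slice l none (some ((pre.length : Nat) : Int)) = pre := by
        rw [PySem.List.slice_to_natCast, hl, List.take_left]
      simp only [List.filter_cons]
      have hlen : ((pre.length : Int) + 1) = (((pre ++ [x]).length : Nat) : Int) := by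
        simp
      by_cases hx : x ∈ pre
      · have hc : (!((PySem.List.slice l none (some ((pre.length : Nat) : Int))).contains x)) = false := by
          simp [hslice]; exact hx
        rw [hc]
        simp only [Bool.false_eq_true, if_false, firstOcc, if_pos hx]
        rw [hlen, ih (pre ++ [x]) (by simp [hl])]
        refine firstOcc_congr _ _ _ ?_
        intro y
        simp only [List.mem_append, List.mem_singleton]
        constructor
        · rintro (h | rfl)
          · exact h
          · exact hx
        · exact Or.inl
      · have hc : (!((PySem.List.slice l none (some ((pre.length : Nat) : Int))).contains x)) = true := by
          simp [hslice]; exact hx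
        rw [hc]
        simp only [if_true, List.map_cons, firstOcc, if_neg hx]
        rw [hlen, ih (pre ++ [x]) (by simp [hl])]

-- ===== VERDICT (by name: the statement is the Claim_ definition above) =====
theorem normalize_ports_py_spec : Claim_equal_normalize_ports_py := by
  intro values _ _
  unfold Spec_normalize_ports_py normalize_ports_py normalize_ports_py_alt
  rw [show (PySem.Set.empty : PySem.Set Int) = ([] : List Int) from rfl,
      go_eq_firstOcc]
  have := filter_eq_firstOcc values values [] (by simp)
  simp only [List.length_nil, Nat.cast_zero] at this
  simp only [List.map_id', List.nil_append]
  exact (this).symm
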